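-- pv_equiv track=rewrite | github.com/MODIFYC/MalangMaker | descriptions.py | get_malang_data
-- ===== SOURCE A (Python) =====
-- MALANG_CONFIG = {
--     "typeA": {
--         "status": {
--             # 레벨 구간별 설정
--             "levels": [
--                 {
--                     "max_lvl": 2,
--                     "title": "[빙하의 알] ❄️",
--                     "desc": "맑고 투명한 얼음 조각 같습니다. 차가운 한기가 기분 좋게 느껴져요.",
--                 },
--                 {
--                     "max_lvl": 4,
--                     "title": "[꼬마 서리] ✨",
--                     "desc": "작은 손발이 돋아났어요! 스스로 통통 튀어 다니며 성에를 뿌립니다.",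
--                 },
--                 {
--                     "max_lvl": 7,
--                     "title": "[수정 가디언] 💎",
--                     "desc": "단단한 뿔이 솟아났습니다. 몸 안에서 신비로운 푸른 빛이 자라납니다.",
--                 },
--                 {
--                     "max_lvl": 10,
--                     "title": "[빙룡의 후예] 🐉",
--                     "desc": "거대한 수정 날개가 펼쳐졌습니다. 위엄 있는 빙룡의 모습이 보입니다.",
--                 },
--                 {
--                     "max_lvl": 14,
--                     "title": "[고대의 환수] 🌀",
--                     "desc": "날개가 날카로운 얼음 깃털로 변했습니다. 주변의 공기를 얼리는 기세입니다.",
--                 },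
--                 {
--                     "max_lvl": 15,
--                     "title": "[영원한 빙룡왕] 👑",
--                     "desc": "전설의 왕관을 쓴 빙룡의 왕입니다. 가슴의 코어가 생명력을 뿜어냅니다.",
--                 },
--             ],
--             # 사망 시 설정
--             "dead": {
--                 "title": "💀 [부서진 결정]",
--                 "desc": "말랑이가 에너지를 버티지 못하고 흩어졌습니다... 차가운 묘비만이 자리를 지킵니다.",
--             },
--         }
--     }
--     # 여기에 typeB, typeC 등을 동일한 구조로 추가 가능
-- }
--
-- def get_malang_data(malang_type, level, is_dead=False):
--     """지정한 타입과 레벨에 맞는 title과 desc를 반환하는 함수"""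
--     # 1. 해당 타입의 status 데이터 가져오기 (기본값 typeA)
--     type_conf = MALANG_CONFIG.get(malang_type, MALANG_CONFIG["typeA"])["status"]
--
--     # 2. 사망 상태 처리
--     if is_dead:
--         return type_conf["dead"]["title"], type_conf["dead"]["desc"]
--
--     # 3. 레벨 구간 매칭
--     for stage in type_conf["levels"]:
--         if level <= stage["max_lvl"]:
--             return stage["title"], stage["desc"]
--
--     # 예외 상황(만렙 이상 등)은 마지막 단계 반환
--     return type_conf["levels"][-1]["title"], type_conf["levels"][-1]["desc"]
-- ===== SOURCE B (Python) =====
-- import bisect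
--
-- MALANG_CONFIG = {
--     "typeA": {
--         "status": {
--             "levels": [
--                 {
--                     "max_lvl": 2,
--                     "title": "[빙하의 알] ❄️",
--                     "desc": "맑고 투명한 얼음 조각 같습니다. 차가운 한기가 기분 좋게 느껴져요.",
--                 },
--                 {
--                     "max_lvl": 4,
--                     "title": "[꼬마 서리] ✨",
--                     "desc": "작은 손발이 돋아났어요! 스스로 통통 튀어 다니며 성에를 뿌립니다.",
--                 },
--                 {
--                     "max_lvl": 7,
--                     "title": "[수정 가디언] 💎",
--                     "desc": "단단한 뿔이 솟아났습니다. 몸 안에서 신비로운 푸른 빛이 자라납니다.",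
--                 },
--                 {
--                     "max_lvl": 10,
--                     "title": "[빙룡의 후예] 🐉",
--                     "desc": "거대한 수정 날개가 펼쳐졌습니다. 위엄 있는 빙룡의 모습이 보입니다.",
--                 },
--                 {
--                     "max_lvl": 14,
--                     "title": "[고대의 환수] 🌀",
--                     "desc": "날개가 날카로운 얼음 깃털로 변했습니다. 주변의 공기를 얼리는 기세입니다.",
--                 },
--                 {
--                     "max_lvl": 15,
--                     "title": "[영원한 빙룡왕] 👑",
--                     "desc": "전설의 왕관을 쓴 빙룡의 왕입니다. 가슴의 코어가 생명력을 뿜어냅니다.",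
--                 },
--             ],
--             "dead": {
--                 "title": "💀 [부서진 결정]",
--                 "desc": "말랑이가 에너지를 버티지 못하고 흩어졌습니다... 차가운 묘비만이 자리를 지킵니다.",
--             },
--         }
--     }
-- }
--
--
-- def get_malang_data(malang_type, level, is_dead=False):
--     """지정한 타입과 레벨에 맞는 title과 desc를 반환하는 함수"""
--     type_conf = MALANG_CONFIG.get(malang_type, MALANG_CONFIG["typeA"])["status"]
--
--     if is_dead:
--         return type_conf["dead"]["title"], type_conf["dead"]["desc"]
--
--     levels = type_conf["levels"]
--     thresholds = [s["max_lvl"] for s in levels]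
--     idx = min(bisect.bisect_left(thresholds, level), len(levels) - 1)
--     stage = levels[idx]
--     return stage["title"], stage["desc"]
-- ===== Notes on version B (the rewrite author's own statement) =====
-- stated objective: idiomatic
-- what changed: Replaces A's sequential scan over the level brackets plus a separate fallback return with a bisect_left binary search over the precomputed threshold list, clamped to the last stage index.
import Mathlib
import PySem

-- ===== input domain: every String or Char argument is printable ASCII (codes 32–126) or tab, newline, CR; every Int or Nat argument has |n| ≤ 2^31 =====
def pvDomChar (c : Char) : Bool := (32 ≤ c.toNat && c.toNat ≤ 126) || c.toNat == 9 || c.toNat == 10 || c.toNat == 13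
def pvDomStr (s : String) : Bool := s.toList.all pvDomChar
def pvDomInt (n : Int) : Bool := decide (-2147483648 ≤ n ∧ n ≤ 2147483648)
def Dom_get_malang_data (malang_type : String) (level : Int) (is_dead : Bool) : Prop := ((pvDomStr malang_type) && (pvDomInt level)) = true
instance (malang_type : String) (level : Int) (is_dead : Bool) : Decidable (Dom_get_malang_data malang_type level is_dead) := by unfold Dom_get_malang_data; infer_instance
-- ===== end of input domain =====

-- ===== PORT A =====
-- B changes the level lookup to a bisect_left binary search over the threshold list (idiomatic; same behaviour).

-- The constant MALANG_CONFIG: per type, (levels as (max_lvl, title, desc) list, dead as (title, desc)).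
structure MalangStatus where
  levels : List (Int × String × String)
  dead : String × String
deriving Repr

def typeAStatus : MalangStatus :=
  { levels :=
      [ (2, "[빙하의 알] ❄️", "맑고 투명한 얼음 조각 같습니다. 차가운 한기가 기분 좋게 느껴져요."),
        (4, "[꼬마 서리] ✨", "작은 손발이 돋아났어요! 스스로 통통 튀어 다니며 성에를 뿌립니다."),
        (7, "[수정 가디언] 💎", "단단한 뿔이 솟아났습니다. 몸 안에서 신비로운 푸른 빛이 자라납니다."),
        (10, "[빙룡의 후예] 🐉", "거대한 수정 날개가 펼쳐졌습니다. 위엄 있는 빙룡의 모습이 보입니다."),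
        (14, "[고대의 환수] 🌀", "날개가 날카로운 얼음 깃털로 변했습니다. 주변의 공기를 얼리는 기세입니다."),
        (15, "[영원한 빙룡왕] 👑", "전설의 왕관을 쓴 빙룡의 왕입니다. 가슴의 코어가 생명력을 뿜어냅니다.") ],
    dead := ("💀 [부서진 결정]", "말랑이가 에너지를 버티지 못하고 흩어졌습니다... 차가운 묘비만이 자리를 지킵니다.") }

def MALANG_CONFIG : PySem.Dict String MalangStatus := PySem.Dict.ofList [("typeA", typeAStatus)]

-- the 'for stage in levels' scan of A
def scanLevels (stages : List (Int × String × String)) (level : Int) : Option (String × String) :=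
  match stages with
  | [] => none
  | (maxLvl, title, desc) :: rest =>
      if level ≤ maxLvl then some (title, desc) else scanLevels rest level

def get_malang_data (malang_type : String) (level : Int) (is_dead : Bool) : String × String :=
  let type_conf := (MALANG_CONFIG.get? malang_type).getD typeAStatus
  if is_dead then (type_conf.dead.1, type_conf.dead.2)
  else
    match scanLevels type_conf.levels level with
    | some r => r
    | none =>
        let last := type_conf.levels.getLastD (0, "", "")
        (last.2.1, last.2.2)

-- ===== PORT B =====
-- bisect.bisect_left(a, x) with lo=0, hi=len(a); recursion on hi - lo mirrors the while loop.
-- fuel = hi - lo bounds the number of loop iterations; each iteration consumes one unit.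
def bisectLeft (a : List Int) (x : Int) : Nat → Nat → Nat → Nat
  | 0, lo, _ => lo
  | fuel + 1, lo, hi =>
    if lo < hi then
      let mid := (lo + hi) / 2
      if a.getD mid 0 < x then bisectLeft a x fuel (mid + 1) hi else bisectLeft a x fuel lo mid
    else lo

def get_malang_data_alt (malang_type : String) (level : Int) (is_dead : Bool) : String × String :=
  let type_conf := (MALANG_CONFIG.get? malang_type).getD typeAStatus
  if is_dead then (type_conf.dead.1, type_conf.dead.2)
  else
    let levels := type_conf.levels
    let thresholds := levels.map (·.1)
    let idx := min (bisectLeft thresholds level thresholds.length 0 thresholds.length) (levels.length - 1)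
    let stage := levels.getD idx (0, "", "")
    (stage.2.1, stage.2.2)

-- ===== PRECONDITION & SPEC =====
def Spec_get_malang_data (malang_type : String) (level : Int) (is_dead : Bool) (out : String × String) : Prop := out = get_malang_data_alt malang_type level is_dead
instance (malang_type : String) (level : Int) (is_dead : Bool) (out : String × String) : Decidable (Spec_get_malang_data malang_type level is_dead out) := by unfold Spec_get_malang_data; infer_instance

-- ===== CLAIM (what is proved, stated in full; the proofs are below) =====
def Claim_equal_get_malang_data : Prop := ∀ (malang_type : String) (level : Int) (is_dead : Bool), Dom_get_malang_data malang_type level is_dead → Spec_get_malang_data malang_type level is_dead (get_malang_data malang_type level is_dead)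

-- ===== LEMMAS AND PROOFS =====
-- the config dict has a single entry, so the defaulted lookup is typeAStatus for every key
theorem conf_eq (t : String) : (MALANG_CONFIG.get? t).getD typeAStatus = typeAStatus := by
  have hm : MALANG_CONFIG = PySem.Dict.mk [("typeA", typeAStatus)] := rfl
  rw [hm, PySem.Dict.get?_mk_cons]
  split
  · rfl
  · rfl

theorem ports_agree (malang_type : String) (level : Int) (is_dead : Bool) :
    get_malang_data malang_type level is_dead = get_malang_data_alt malang_type level is_dead := by
  unfold get_malang_data get_malang_data_alt
  simp only [conf_eq]
  cases is_dead
  case true => simp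
  case false =>
    simp only [if_neg Bool.false_ne_true]
    by_cases h0 : level ≤ 2
    · simp [typeAStatus, scanLevels, bisectLeft, h0, show ¬((2:Int) < level) by omega, show ¬((4:Int) < level) by omega, show ¬((7:Int) < level) by omega, show ¬((10:Int) < level) by omega, show ¬((14:Int) < level) by omega, show ¬((15:Int) < level) by omega]
    by_cases h1 : level ≤ 4
    · simp [typeAStatus, scanLevels, bisectLeft, h0, h1, show ((2:Int) < level) by omega, show ¬((4:Int) < level) by omega, show ¬((7:Int) < level) by omega, show ¬((10:Int) < level) by omega, show ¬((14:Int) < level) by omega, show ¬((15:Int) < level) by omega]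
    by_cases h2 : level ≤ 7
    · simp [typeAStatus, scanLevels, bisectLeft, h0, h1, h2, show ((2:Int) < level) by omega, show ((4:Int) < level) by omega, show ¬((7:Int) < level) by omega, show ¬((10:Int) < level) by omega, show ¬((14:Int) < level) by omega, show ¬((15:Int) < level) by omega]
    by_cases h3 : level ≤ 10
    · simp [typeAStatus, scanLevels, bisectLeft, h0, h1, h2, h3, show ((2:Int) < level) by omega, show ((4:Int) < level) by omega, show ((7:Int) < level) by omega, show ¬((10:Int) < level) by omega, show ¬((14:Int) < level) by omega, show ¬((15:Int) < level) by omega]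
    by_cases h4 : level ≤ 14
    · simp [typeAStatus, scanLevels, bisectLeft, h0, h1, h2, h3, h4, show ((2:Int) < level) by omega, show ((4:Int) < level) by omega, show ((7:Int) < level) by omega, show ((10:Int) < level) by omega, show ¬((14:Int) < level) by omega, show ¬((15:Int) < level) by omega]
    by_cases h5 : level ≤ 15
    · simp [typeAStatus, scanLevels, bisectLeft, h0, h1, h2, h3, h4, h5, show ((2:Int) < level) by omega, show ((4:Int) < level) by omega, show ((7:Int) < level) by omega, show ((10:Int) < level) by omega, show ((14:Int) < level) by omega, show ¬((15:Int) < level) by omega]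
    simp [typeAStatus, scanLevels, bisectLeft, h0, h1, h2, h3, h4, h5, show ((2:Int) < level) by omega, show ((4:Int) < level) by omega, show ((7:Int) < level) by omega, show ((10:Int) < level) by omega, show ((14:Int) < level) by omega, show ((15:Int) < level) by omega]

-- ===== VERDICT (by name: the statement is the Claim_ definition above) =====
theorem get_malang_data_spec : Claim_equal_get_malang_data := by
  intro malang_type level is_dead _
  exact ports_agree malang_type level is_dead
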